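-- pv_equiv track=rewrite | github.com/fdurupinar/sOED | FlowCytometry/ga/staticMethods.py | generate_cross_over_indices_2_point
-- ===== SOURCE A (Python) =====
-- def generate_cross_over_indices_2_point(ind_len):
--     """
--     Generate an array of arrays for indices to cross-over
--     :param ind_len:
--     :return:
--     """
--     inds_group = []
--     for i in range(0, ind_len):
--         for j in range(i + 1, ind_len):
--             for k in range(0, ind_len):
--                 for l in range(k + 1, ind_len):
--                     inds = [[i, j], [k, l]]
--                     inds_group.append(inds)
--
--     return inds_group
-- ===== SOURCE B (Python) =====
-- def next_pair(ind_len, p):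
--     """Successor of an ordered index pair in lexicographic order, or None."""
--     a, b = p
--     if b + 1 < ind_len:
--         return [a, b + 1]
--     if a + 2 < ind_len:
--         return [a + 1, a + 2]
--     return None
--
--
-- def generate_cross_over_indices_2_point(ind_len):
--     """Single-loop odometer: advance a (pair, pair) state by its successor."""
--     if ind_len < 2:
--         return []
--     out = []
--     p, q = [0, 1], [0, 1]
--     while True:
--         out.append([list(p), list(q)])
--         nq = next_pair(ind_len, q)
--         if nq is not None:
--             q = nq
--             continue
--         np_ = next_pair(ind_len, p)
--         if np_ is None:
--             return out
--         p, q = np_, [0, 1]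
-- ===== Notes on version B (the rewrite author's own statement) =====
-- stated objective: alternative
-- what changed: B replaces the four nested loops by a single while-loop over an explicit (pair, pair) odometer state advanced by a lexicographic successor function, emitting one result per iteration.
import Mathlib
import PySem

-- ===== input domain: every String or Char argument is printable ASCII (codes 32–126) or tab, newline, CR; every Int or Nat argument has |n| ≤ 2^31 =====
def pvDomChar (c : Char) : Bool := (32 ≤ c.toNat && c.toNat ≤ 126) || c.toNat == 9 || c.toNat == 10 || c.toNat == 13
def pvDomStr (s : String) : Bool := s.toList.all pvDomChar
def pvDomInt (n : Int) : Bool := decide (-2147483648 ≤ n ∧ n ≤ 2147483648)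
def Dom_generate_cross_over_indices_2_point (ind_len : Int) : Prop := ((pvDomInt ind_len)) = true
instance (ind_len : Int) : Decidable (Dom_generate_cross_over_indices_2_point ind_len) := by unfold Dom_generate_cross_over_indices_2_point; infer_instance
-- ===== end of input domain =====

-- B replaces the four nested loops by one while-loop over a (pair, pair) odometer state advanced by a successor function (alternative decomposition; same output).
-- ===== PORT A =====
def generate_cross_over_indices_2_point (ind_len : Int) : List (List (List Int)) :=
  (PySem.List.pyRange 0 ind_len 1).foldl (fun acc i =>
    (PySem.List.pyRange (i + 1) ind_len 1).foldl (fun acc j =>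
      (PySem.List.pyRange 0 ind_len 1).foldl (fun acc k =>
        (PySem.List.pyRange (k + 1) ind_len 1).foldl (fun acc l =>
          acc ++ [[[i, j], [k, l]]]) acc) acc) acc) []

-- ===== PORT B =====
-- successor of an ordered index pair in lexicographic order, or none (Source B's next_pair)
def nextPair (ind_len : Int) (p : Int × Int) : Option (Int × Int) :=
  if p.2 + 1 < ind_len then some (p.1, p.2 + 1)
  else if p.1 + 2 < ind_len then some (p.1 + 1, p.1 + 2)
  else none

-- termination helper for the odometer loop: the successor strictly decreases this lex measure
theorem nextPair_lt {n : Int} {q q' : Int × Int} (h : nextPair n q = some q') :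
    Prod.Lex (· < ·) (· < ·) ((n - q'.1).toNat, (n - q'.2).toNat)
      ((n - q.1).toNat, (n - q.2).toNat) := by
  unfold nextPair at h
  split_ifs at h with h1 h2
  · cases h; exact Prod.Lex.right _ (by omega)
  · cases h; exact Prod.Lex.left _ _ (by omega)

-- Source B's while-loop: emit the current state, then advance the (pair, pair) odometer
def loopB (n : Int) (p q : Int × Int) : List (List (List Int)) :=
  [[p.1, p.2], [q.1, q.2]] ::
    (match h : nextPair n q with
     | some q' => loopB n p q'
     | none =>
       match h2 : nextPair n p with
       | some p' => loopB n p' (0, 1)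
       | none => [])
termination_by ((n - p.1).toNat, (n - p.2).toNat, (n - q.1).toNat, (n - q.2).toNat)
decreasing_by
  · exact Prod.Lex.right _ (Prod.Lex.right _ (nextPair_lt h))
  · rcases Prod.lex_iff.mp (nextPair_lt h2) with hl | ⟨heq, hr⟩
    · exact Prod.Lex.left _ _ hl
    · rw [show ((n - p'.1).toNat : ℕ) = (n - p.1).toNat from heq]
      exact Prod.Lex.right _ (Prod.Lex.left _ _ hr)

def generate_cross_over_indices_2_point_alt (ind_len : Int) : List (List (List Int)) :=
  if ind_len < 2 then [] else loopB ind_len (0, 1) (0, 1)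

-- ===== PRECONDITION & SPEC =====
def Spec_generate_cross_over_indices_2_point (ind_len : Int) (out : List (List (List Int))) : Prop := out = generate_cross_over_indices_2_point_alt ind_len
instance (ind_len : Int) (out : List (List (List Int))) : Decidable (Spec_generate_cross_over_indices_2_point ind_len out) := by unfold Spec_generate_cross_over_indices_2_point; infer_instance

-- ===== CLAIM =====
def Claim_equal_generate_cross_over_indices_2_point : Prop := ∀ (ind_len : Int), Dom_generate_cross_over_indices_2_point ind_len → Spec_generate_cross_over_indices_2_point ind_len (generate_cross_over_indices_2_point ind_len)

-- ===== LEMMAS AND PROOFS =====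

-- the stream of pairs the odometer visits starting from (a, b)
def sufPairs (n : Int) (a b : Int) : List (Int × Int) :=
  (a, b) ::
    (match h : nextPair n (a, b) with
     | some p => sufPairs n p.1 p.2
     | none => [])
termination_by ((n - a).toNat, (n - b).toNat)
decreasing_by exact nextPair_lt h

theorem sufPairs_some {n a b : Int} {p : Int × Int} (h : nextPair n (a, b) = some p) :
    sufPairs n a b = (a, b) :: sufPairs n p.1 p.2 := by
  rw [sufPairs]
  split
  · next q hq => rw [hq] at h; injection h with h; rw [h]
  · next hq => rw [hq] at h; cases h

theorem sufPairs_none {n a b : Int} (h : nextPair n (a, b) = none) :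
    sufPairs n a b = [(a, b)] := by
  rw [sufPairs]
  split
  · next q hq => rw [hq] at h; cases h
  · rfl

theorem sufPairs_spec (n a b : Int) : a < b → b < n →
    sufPairs n a b =
      (PySem.List.pyRange b n 1).map (fun j => (a, j)) ++
      (PySem.List.pyRange (a + 1) n 1).flatMap (fun i =>
        (PySem.List.pyRange (i + 1) n 1).map (fun j => (i, j))) := by
  induction a, b using sufPairs.induct (n := n) with
  | _ a b ih =>
    intro hab hbn
    rw [sufPairs]
    split
    · next p hp =>
      have hp' := hp
      unfold nextPair at hp'
      split_ifs at hp' with h1 h2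
      · obtain rfl : (a, b + 1) = p := by injection hp'
        rw [ih _ hp (by omega) (by omega),
            PySem.List.pyRange_one_cons (show b < n by omega)]
        simp
      · obtain rfl : (a + 1, a + 2) = p := by injection hp'
        rw [ih _ hp (by omega) (by omega),
            show PySem.List.pyRange b n 1 = [b] by
              rw [PySem.List.pyRange_one_cons (show b < n by omega),
                  PySem.List.pyRange_one_eq_nil (by omega)],
            PySem.List.pyRange_one_cons (show a + 1 < n by omega)]
        simp [show a + 1 + 1 = a + 2 from by omega]
    · next hp =>
      have hp' := hp
      unfold nextPair at hp'
      split_ifs at hp' with h1 h2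
      have h1' : ¬ b + 1 < n := h1
      have h2' : ¬ a + 2 < n := h2
      rw [show PySem.List.pyRange b n 1 = [b] by
            rw [PySem.List.pyRange_one_cons (show b < n by omega),
                PySem.List.pyRange_one_eq_nil (by omega)],
          show PySem.List.pyRange (a + 1) n 1 = [b] by
            rw [show a + 1 = b by omega]
            rw [PySem.List.pyRange_one_cons (show b < n by omega),
                PySem.List.pyRange_one_eq_nil (by omega)]]
      simp [PySem.List.pyRange_one_eq_nil (show n ≤ b + 1 by omega)]

theorem loopB_eq (n : Int) (p : Int × Int) (a b : Int) :
    loopB n p (a, b) =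
      (sufPairs n a b).map (fun q' => [[p.1, p.2], [q'.1, q'.2]]) ++
      (match nextPair n p with
       | some p' => loopB n p' (0, 1)
       | none => []) := by
  induction a, b using sufPairs.induct (n := n) with
  | _ a b ih =>
    rw [loopB, sufPairs]
    split
    · next q' hq =>
      rw [ih q' hq, show q' = (q'.1, q'.2) from rfl]
      simp
    · next hq =>
      simp only [List.map_cons, List.cons_append, List.cons.injEq, true_and]
      split
      · next p' hp2 => rw [hp2]; simp
      · next hp2 => rw [hp2]; simp

theorem loopB_flatMap (n a b : Int) :
    loopB n (a, b) (0, 1) =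
      (sufPairs n a b).flatMap (fun p =>
        (sufPairs n 0 1).map (fun q => [[p.1, p.2], [q.1, q.2]])) := by
  induction a, b using sufPairs.induct (n := n) with
  | _ a b ih =>
    rw [loopB_eq]
    cases hp : nextPair n (a, b) with
    | some p' =>
      rw [sufPairs_some hp]
      simp only [hp]
      rw [show loopB n p' (0, 1) = loopB n (p'.1, p'.2) (0, 1) from rfl, ih p' hp]
      simp
    | none =>
      rw [sufPairs_none hp]
      simp

-- the full ordered-pair list, in A's order
def pairsL (n : Int) : List (Int × Int) :=
  (PySem.List.pyRange 0 n 1).flatMap (fun i =>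
    (PySem.List.pyRange (i + 1) n 1).map (fun j => (i, j)))

theorem pairsL_eq_sufPairs (n : Int) (hn : 2 ≤ n) : pairsL n = sufPairs n 0 1 := by
  rw [pairsL, sufPairs_spec n 0 1 (by omega) (by omega),
      PySem.List.pyRange_one_cons (show (0:Int) < n by omega)]
  simp

theorem A_eq_pairs (n : Int) :
    generate_cross_over_indices_2_point n =
      (pairsL n).flatMap (fun p => (pairsL n).map (fun q => [[p.1, p.2], [q.1, q.2]])) := by
  unfold generate_cross_over_indices_2_point pairsL
  simp only [PySem.List.foldl_append_eq_flatMap, List.nil_append, List.map_eq_flatMap,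
    List.flatMap_assoc, List.flatMap_singleton]

theorem pairsL_nil (n : Int) (hn : n < 2) : pairsL n = [] := by
  unfold pairsL
  by_cases h : n ≤ 0
  · rw [PySem.List.pyRange_one_eq_nil h]; rfl
  · have : n = 1 := by omega
    subst this; decide

-- ===== VERDICT =====
theorem generate_cross_over_indices_2_point_spec : Claim_equal_generate_cross_over_indices_2_point := by
  intro n _
  unfold Spec_generate_cross_over_indices_2_point generate_cross_over_indices_2_point_alt
  rw [A_eq_pairs]
  by_cases hn : n < 2
  · simp [hn, pairsL_nil n hn]
  · rw [if_neg hn, loopB_flatMap, pairsL_eq_sufPairs n (by omega)]
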